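-- pv_equiv track=rewrite | github.com/u-d-ash/Mind-Your-Wordle | functions.py | get_color_comb
-- ===== SOURCE A (Python) =====
-- def get_color_comb(guess, ans):
--
--     ans_letter_count = {letter: ans.count(letter) for letter in set(ans)}
--
--     code = ['_'] * 5
--
--     green_inds = []
--
--     for i in range(5):
--         if(guess[i] == ans[i]):
--             code[i] = '1'
--             green_inds.append(i)
--             ans_letter_count[guess[i]] -= 1
--
--     rem_inds = [i for i in range(5) if i not in green_inds]
--
--     rem_ans_lets = [ans[x] for x in rem_inds]
--
--     greys = []
--
--     for ri in rem_inds: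
--
--
--         if(guess[ri] not in rem_ans_lets):
--
--             code[ri] = '3'
--             greys.append(ri)
--
--
--     yell_cands = [i for i in range(5) if i not in greys and i in rem_inds]
--
--     for yi in yell_cands:
--
--         if(ans_letter_count[guess[yi]] >= 1):
--             code[yi] = '2'
--             ans_letter_count[guess[yi]] -= 1
--         else:
--             code[yi] = '3'
--
--
--     return "".join(code)
-- ===== SOURCE B (Python) =====
-- def get_color_comb(guess, ans):
--     cnt = {}
--     for ch in ans:
--         cnt[ch] = cnt.get(ch, 0) + 1
--     for i in range(5):
--         if guess[i] == ans[i]: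
--             cnt[guess[i]] -= 1
--     rem = {ans[i] for i in range(5) if guess[i] != ans[i]}
--     out = []
--     for i in range(5):
--         if guess[i] == ans[i]:
--             out.append('1')
--         elif guess[i] in rem and cnt.get(guess[i], 0) >= 1:
--             out.append('2')
--             cnt[guess[i]] -= 1
--         else:
--             out.append('3')
--     return ''.join(out)
-- ===== Notes on version B (the rewrite author's own statement) =====
-- stated objective: simpler
-- what changed: B builds a letter counter in one sweep and a set of non-green answer letters, then colours the five positions in a single merged pass, replacing A's per-letter ans.count dict comprehension and its green_inds/rem_inds/greys/yell_cands index bookkeeping across four list passes.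
import Mathlib
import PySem

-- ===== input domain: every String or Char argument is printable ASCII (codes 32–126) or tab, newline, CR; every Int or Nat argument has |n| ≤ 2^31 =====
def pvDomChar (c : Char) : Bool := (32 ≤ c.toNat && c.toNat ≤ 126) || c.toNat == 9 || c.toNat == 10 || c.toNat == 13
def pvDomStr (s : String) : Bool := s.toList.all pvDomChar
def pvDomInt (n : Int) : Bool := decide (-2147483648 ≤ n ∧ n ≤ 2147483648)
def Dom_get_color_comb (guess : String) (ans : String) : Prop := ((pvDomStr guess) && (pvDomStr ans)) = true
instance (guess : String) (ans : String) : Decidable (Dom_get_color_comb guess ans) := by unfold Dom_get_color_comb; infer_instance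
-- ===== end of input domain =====

-- B merges A's grey pre-pass and yellow pass into one positional pass driven by a letter
-- counter and a set of non-green answer letters, dropping A's green_inds/rem_inds/greys
-- index bookkeeping (objective: simpler).

-- ===== PORT A =====
-- The dict comprehension iterates over set(ans) in hash order, but the dict is only ever
-- looked up afterwards, so the insertion order cannot influence the result.
-- 'ans_letter_count[k] -= 1' and the '>= 1' lookup always hit an existing key (the key is a
-- letter of ans), so Dict.modify/getD with default 0 are exact here.
def get_color_comb (guess : String) (ans : String) : String :=
  let gl := guess.toList
  let al := ans.toList
  let alc0 : PySem.Dict Char Int :=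
    (PySem.Set.ofList al).foldl
      (fun d letter => d.insert letter ((al.count letter : Int))) PySem.Dict.empty
  let st1 := (PySem.List.pyRange 0 5 1).foldl
    (fun (s : List Char × List Int × PySem.Dict Char Int) i =>
      if PySem.List.pyGetD gl i ' ' = PySem.List.pyGetD al i ' ' then
        (PySem.List.pySetD s.1 i '1', s.2.1 ++ [i],
         s.2.2.modify (PySem.List.pyGetD gl i ' ') 0 (· - 1))
      else s)
    (['_','_','_','_','_'], ([], alc0))
  let green_inds := st1.2.1
  let rem_inds := (PySem.List.pyRange 0 5 1).filter (fun i => decide (i ∉ green_inds))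
  let rem_ans_lets := rem_inds.map (fun x => PySem.List.pyGetD al x ' ')
  let st2 := rem_inds.foldl
    (fun (s : List Char × List Int) ri =>
      if PySem.List.pyGetD gl ri ' ' ∉ rem_ans_lets then
        (PySem.List.pySetD s.1 ri '3', s.2 ++ [ri])
      else s)
    (st1.1, [])
  let greys := st2.2
  let yell_cands := (PySem.List.pyRange 0 5 1).filter
    (fun i => decide (i ∉ greys ∧ i ∈ rem_inds))
  let st3 := yell_cands.foldl
    (fun (s : List Char × PySem.Dict Char Int) yi =>
      if s.2.getD (PySem.List.pyGetD gl yi ' ') 0 ≥ 1 then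
        (PySem.List.pySetD s.1 yi '2',
         s.2.modify (PySem.List.pyGetD gl yi ' ') 0 (· - 1))
      else (PySem.List.pySetD s.1 yi '3', s.2))
    (st2.1, st1.2.2)
  String.ofList st3.1

-- ===== PORT B =====
-- 'cnt[k] -= 1' always hits an existing key (k is a letter of ans), so Dict.modify with
-- default 0 is exact; ''.join of the one-char pieces is the char list as a String.
def get_color_comb_alt (guess : String) (ans : String) : String :=
  let gl := guess.toList
  let al := ans.toList
  let cnt0 : PySem.Dict Char Int :=
    al.foldl (fun d ch => d.insert ch (d.getD ch 0 + 1)) PySem.Dict.empty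
  let cnt1 := (PySem.List.pyRange 0 5 1).foldl
    (fun d i => if PySem.List.pyGetD gl i ' ' = PySem.List.pyGetD al i ' ' then
        d.modify (PySem.List.pyGetD gl i ' ') 0 (· - 1) else d) cnt0
  let rem : PySem.Set Char := PySem.Set.ofList
    (((PySem.List.pyRange 0 5 1).filter
        (fun i => decide (PySem.List.pyGetD gl i ' ' ≠ PySem.List.pyGetD al i ' '))).map
      (fun i => PySem.List.pyGetD al i ' '))
  let st := (PySem.List.pyRange 0 5 1).foldl
    (fun (s : List Char × PySem.Dict Char Int) i =>
      if PySem.List.pyGetD gl i ' ' = PySem.List.pyGetD al i ' ' then (s.1 ++ ['1'], s.2)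
      else if PySem.List.pyGetD gl i ' ' ∈ rem ∧ s.2.getD (PySem.List.pyGetD gl i ' ') 0 ≥ 1 then
        (s.1 ++ ['2'], s.2.modify (PySem.List.pyGetD gl i ' ') 0 (· - 1))
      else (s.1 ++ ['3'], s.2))
    ([], cnt1)
  String.ofList st.1

-- ===== PRECONDITION & SPEC =====
-- Pre_ excludes exactly the inputs where Python A raises IndexError: guess[i]/ans[i] for
-- i < 5 require both strings to have at least 5 characters.
def Pre_get_color_comb (guess : String) (ans : String) : Prop :=
  5 ≤ PySem.Str.len guess ∧ 5 ≤ PySem.Str.len ans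
instance (guess : String) (ans : String) : Decidable (Pre_get_color_comb guess ans) := by
  unfold Pre_get_color_comb; infer_instance

def pvWitness_get_color_comb : String × String := ("crane", "slate")

def Spec_get_color_comb (guess : String) (ans : String) (out : String) : Prop :=
  out = get_color_comb_alt guess ans
instance (guess : String) (ans : String) (out : String) : Decidable (Spec_get_color_comb guess ans out) := by
  unfold Spec_get_color_comb; infer_instance

-- ===== CLAIM (what is proved, stated in full; the proofs are below) =====
def Claim_equal_get_color_comb : Prop := ∀ (guess : String) (ans : String),
  Dom_get_color_comb guess ans → Pre_get_color_comb guess ans →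
  Spec_get_color_comb guess ans (get_color_comb guess ans)

-- ===== LEMMAS AND PROOFS =====

-- Both initial counters agree with List.count on every key.
lemma getD_setfold_count (al : List Char) (c : Char) :
    ((PySem.Set.ofList al).foldl
      (fun d letter => d.insert letter ((al.count letter : Int))) PySem.Dict.empty).getD c 0
    = (al.count c : Int) := by
  have hfresh : ∀ a ∈ PySem.Set.ofList al,
      (PySem.Dict.empty : PySem.Dict Char Int).contains a = false := by
    intro a _; simp [PySem.Dict.contains_empty]
  have hnd : ((PySem.Set.ofList al).map id).Nodup := by
    simp only [List.map_id]
    exact PySem.Set.nodup_ofList al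
  have hitems := PySem.Dict.items_foldl_insert_fresh (PySem.Set.ofList al) id
    (fun letter => (al.count letter : Int)) PySem.Dict.empty hfresh hnd
  set D := (PySem.Set.ofList al).foldl
      (fun d letter => d.insert letter ((al.count letter : Int))) PySem.Dict.empty with hD
  have hit : D.items = (PySem.Set.ofList al).map (fun x => (x, (al.count x : Int))) := by
    simpa using hitems
  have hkeys : D.keys = PySem.Set.ofList al := by
    show D.items.map (·.1) = _
    rw [hit]; simp [Function.comp_def]
  by_cases hc : c ∈ PySem.Set.ofList al
  · have hmem : (c, (al.count c : Int)) ∈ D.items := by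
      rw [hit]; exact List.mem_map_of_mem hc
    exact PySem.Dict.getD_of_mem_items D hmem
      (by rw [hkeys]; exact PySem.Set.nodup_ofList al) 0
  · have hnc : D.contains c = false := by
      rw [PySem.Dict.contains_eq_decide_mem_keys, hkeys]; simpa using hc
    rw [PySem.Dict.getD_of_not_contains D 0 hnc]
    have : c ∉ al := by rwa [PySem.Set.mem_ofList] at hc
    simp [List.count_eq_zero_of_not_mem this]

lemma getD_counterfold_count (al : List Char) (c : Char) :
    (al.foldl (fun d ch => d.insert ch (d.getD ch 0 + 1)) PySem.Dict.empty).getD c 0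
    = (al.count c : Int) := by
  have := PySem.Dict.getD_foldl_insert_add_one al PySem.Dict.empty c
  simpa using this

-- splitting A's first fold (independent components)
lemma st1_split (gl al : List Char) (is : List Int) (c : List Char) (g : List Int)
    (d : PySem.Dict Char Int) :
    is.foldl
      (fun (s : List Char × List Int × PySem.Dict Char Int) i =>
        if PySem.List.pyGetD gl i ' ' = PySem.List.pyGetD al i ' ' then
          (PySem.List.pySetD s.1 i '1', s.2.1 ++ [i],
           s.2.2.modify (PySem.List.pyGetD gl i ' ') 0 (· - 1))
        else s) (c, g, d)
    = (is.foldl (fun c i => if PySem.List.pyGetD gl i ' ' = PySem.List.pyGetD al i ' ' then PySem.List.pySetD c i '1' else c) c,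
       is.foldl (fun g i => if PySem.List.pyGetD gl i ' ' = PySem.List.pyGetD al i ' ' then g ++ [i] else g) g,
       is.foldl (fun d i => if PySem.List.pyGetD gl i ' ' = PySem.List.pyGetD al i ' ' then d.modify (PySem.List.pyGetD gl i ' ') 0 (· - 1) else d) d) := by
  induction is generalizing c g d with
  | nil => rfl
  | cons j js ih => by_cases h : PySem.List.pyGetD gl j ' ' = PySem.List.pyGetD al j ' ' <;>
      simp [h, ih]

-- splitting A's grey fold (independent components)
lemma st2_split (gl : List Char) (lets : List Char) (is : List Int) (c : List Char)
    (g : List Int) :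
    is.foldl
      (fun (s : List Char × List Int) ri =>
        if PySem.List.pyGetD gl ri ' ' ∉ lets then
          (PySem.List.pySetD s.1 ri '3', s.2 ++ [ri])
        else s) (c, g)
    = (is.foldl (fun c ri => if PySem.List.pyGetD gl ri ' ' ∉ lets then PySem.List.pySetD c ri '3' else c) c,
       is.foldl (fun g ri => if PySem.List.pyGetD gl ri ' ' ∉ lets then g ++ [ri] else g) g) := by
  induction is generalizing c g with
  | nil => rfl
  | cons j js ih =>
    by_cases h : PySem.List.pyGetD gl j ' ' ∉ lets
    · rw [List.foldl_cons, List.foldl_cons, List.foldl_cons, if_pos h, if_pos h, if_pos h]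
      exact ih _ _
    · rw [List.foldl_cons, List.foldl_cons, List.foldl_cons, if_neg h, if_neg h, if_neg h]
      exact ih _ _

-- getD-equal dicts stay getD-equal through the green-decrement fold
lemma green_dict_congr (gl al : List Char) (is : List Int)
    (d1 d2 : PySem.Dict Char Int) (h : ∀ c, d1.getD c 0 = d2.getD c 0) :
    ∀ c, (is.foldl (fun d i => if PySem.List.pyGetD gl i ' ' = PySem.List.pyGetD al i ' ' then d.modify (PySem.List.pyGetD gl i ' ') 0 (· - 1) else d) d1).getD c 0
       = (is.foldl (fun d i => if PySem.List.pyGetD gl i ' ' = PySem.List.pyGetD al i ' ' then d.modify (PySem.List.pyGetD gl i ' ') 0 (· - 1) else d) d2).getD c 0 := by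
  induction is generalizing d1 d2 with
  | nil => exact h
  | cons j js ih =>
    intro c
    rw [List.foldl_cons, List.foldl_cons]
    by_cases hg : PySem.List.pyGetD gl j ' ' = PySem.List.pyGetD al j ' '
    · rw [if_pos hg, if_pos hg]
      exact ih _ _ (fun c' => by simp [PySem.Dict.getD_modify, h]) c
    · rw [if_neg hg, if_neg hg]
      exact ih _ _ h c

-- canonical sequential colouring (used to relate both final passes)
def buildCode (green : Int → Prop) [DecidablePred green] (m : Int → Prop) [DecidablePred m]
    (k : Int → Char) : List Int → PySem.Dict Char Int → List Char
  | [], _ => []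
  | i :: is, d =>
    if green i then '1' :: buildCode green m k is d
    else if m i ∧ d.getD (k i) 0 ≥ 1 then
      '2' :: buildCode green m k is (d.modify (k i) 0 (· - 1))
    else '3' :: buildCode green m k is d

lemma buildCode_congr (green : Int → Prop) [DecidablePred green] (m : Int → Prop)
    [DecidablePred m] (k : Int → Char) (is : List Int) (d1 d2 : PySem.Dict Char Int)
    (h : ∀ c, d1.getD c 0 = d2.getD c 0) :
    buildCode green m k is d1 = buildCode green m k is d2 := by
  induction is generalizing d1 d2 with
  | nil => rfl
  | cons j js ih =>
    by_cases hg : green j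
    · simp [buildCode, hg, ih _ _ h]
    · by_cases hm : m j ∧ d1.getD (k j) 0 ≥ 1
      · have hm2 : m j ∧ d2.getD (k j) 0 ≥ 1 := by rw [← h]; exact hm
        simp only [buildCode, if_neg hg, if_pos hm, if_pos hm2]
        refine congrArg _ (ih _ _ (fun c => ?_))
        simp [PySem.Dict.getD_modify, h]
      · have hm2 : ¬ (m j ∧ d2.getD (k j) 0 ≥ 1) := by rw [← h] at *; exact hm
        simp [buildCode, hg, hm, hm2, ih _ _ h]

-- B's append fold computes buildCode
lemma foldB_eq_buildCode (green : Int → Prop) [DecidablePred green] (m : Int → Prop)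
    [DecidablePred m] (k : Int → Char) (is : List Int) (acc : List Char)
    (d : PySem.Dict Char Int) :
    (is.foldl
      (fun (s : List Char × PySem.Dict Char Int) i =>
        if green i then (s.1 ++ ['1'], s.2)
        else if m i ∧ s.2.getD (k i) 0 ≥ 1 then
          (s.1 ++ ['2'], s.2.modify (k i) 0 (· - 1))
        else (s.1 ++ ['3'], s.2)) (acc, d)).1
    = acc ++ buildCode green m k is d := by
  induction is generalizing acc d with
  | nil => simp [buildCode]
  | cons j js ih =>
    by_cases hg : green j
    · simp [buildCode, hg, ih]
    · by_cases hm : m j ∧ d.getD (k j) 0 ≥ 1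
      · simp [buildCode, hg, hm, ih]
      · simp [buildCode, hg, hm, ih]

-- writes at distinct nonnegative positions commute
lemma pySetD_comm (xs : List Char) (i j : Int) (v w : Char) (hi : 0 ≤ i) (hj : 0 ≤ j)
    (hij : i ≠ j) :
    PySem.List.pySetD (PySem.List.pySetD xs i v) j w
    = PySem.List.pySetD (PySem.List.pySetD xs j w) i v := by
  rw [PySem.List.pySetD_of_nonneg _ _ hi, PySem.List.pySetD_of_nonneg _ _ hj,
      PySem.List.pySetD_of_nonneg _ _ hj, PySem.List.pySetD_of_nonneg _ _ hi]
  exact List.set_comm _ _ (by omega)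

-- a write at i commutes with a conditional-write fold avoiding i
lemma setD_fold_comm (p : Int → Prop) [DecidablePred p] (v : Int → Char) (is : List Int)
    (code : List Char) (i : Int) (c : Char) (hi : 0 ≤ i) (hnn : ∀ j ∈ is, 0 ≤ j)
    (hmem : i ∉ is) :
    is.foldl (fun code j => if p j then PySem.List.pySetD code j (v j) else code)
      (PySem.List.pySetD code i c)
    = PySem.List.pySetD
        (is.foldl (fun code j => if p j then PySem.List.pySetD code j (v j) else code) code)
        i c := by
  induction is generalizing code with
  | nil => rfl
  | cons j js ih =>
    have hj : 0 ≤ j := hnn j (by simp)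
    have hij : i ≠ j := by intro h; exact hmem (by simp [h])
    by_cases hp : p j
    · simp only [List.foldl_cons, if_pos hp]
      rw [pySetD_comm _ _ _ _ _ hi hj hij]
      exact ih _ (fun x hx => hnn x (by simp [hx])) (fun h => hmem (by simp [h]))
    · simp only [List.foldl_cons, if_neg hp]
      exact ih _ (fun x hx => hnn x (by simp [hx])) (fun h => hmem (by simp [h]))

-- writing one char at position a into a 5-buffer
lemma take_succ_set (l : List Char) (a : Nat) (c : Char) (h : a < l.length) :
    (l.set a c).take (a+1) = l.take a ++ [c] := by
  rw [List.take_add_one]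
  congr 1
  · exact List.take_set_of_le (le_refl a)
  · simp [h]

-- A's grey pass followed by its yellow pass is the single merged pass (over non-green indices)
lemma grey_yellow_merge (green : Int → Prop) [DecidablePred green] (m : Int → Prop)
    [DecidablePred m] (k : Int → Char) (is : List Int) (code : List Char)
    (d : PySem.Dict Char Int) (hnd : is.Nodup) (hnn : ∀ j ∈ is, 0 ≤ j)
    (hng : ∀ j ∈ is, ¬ green j) :
    (is.filter (fun i => decide (m i))).foldl
      (fun (s : List Char × PySem.Dict Char Int) yi =>
        if s.2.getD (k yi) 0 ≥ 1 then
          (PySem.List.pySetD s.1 yi '2', s.2.modify (k yi) 0 (· - 1))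
        else (PySem.List.pySetD s.1 yi '3', s.2))
      (is.foldl (fun c ri => if ¬ m ri then PySem.List.pySetD c ri '3' else c) code, d)
    = is.foldl
        (fun (s : List Char × PySem.Dict Char Int) i =>
          if green i then (PySem.List.pySetD s.1 i '1', s.2)
          else if m i ∧ s.2.getD (k i) 0 ≥ 1 then
            (PySem.List.pySetD s.1 i '2', s.2.modify (k i) 0 (· - 1))
          else (PySem.List.pySetD s.1 i '3', s.2)) (code, d) := by
  induction is generalizing code d with
  | nil => rfl
  | cons j js ih =>
    have hj : 0 ≤ j := hnn j (by simp)
    have hjs : ∀ x ∈ js, 0 ≤ x := fun x hx => hnn x (by simp [hx])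
    have hjn : j ∉ js := (List.nodup_cons.mp hnd).1
    have hndt : js.Nodup := (List.nodup_cons.mp hnd).2
    have hngt : ∀ x ∈ js, ¬ green x := fun x hx => hng x (by simp [hx])
    have hgj : ¬ green j := hng j (by simp)
    by_cases hm : m j
    · rw [List.filter_cons_of_pos (by simpa using hm)]
      simp only [List.foldl_cons]
      rw [if_neg (not_not_intro hm), if_neg hgj]
      by_cases hc : d.getD (k j) 0 ≥ 1
      · rw [if_pos hc, if_pos ⟨hm, hc⟩]
        rw [← setD_fold_comm (fun ri => ¬ m ri) (fun _ => '3') js code j '2' hj hjs hjn]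
        exact ih _ _ hndt hjs hngt
      · rw [if_neg hc, if_neg (fun h => hc h.2)]
        rw [← setD_fold_comm (fun ri => ¬ m ri) (fun _ => '3') js code j '3' hj hjs hjn]
        exact ih _ _ hndt hjs hngt
    · rw [List.filter_cons_of_neg (by simpa using hm)]
      simp only [List.foldl_cons]
      rw [if_pos hm, if_neg hgj, if_neg (fun h => hm h.1)]
      exact ih _ _ hndt hjs hngt

-- the merged pass over all indices is: green writes first, then the merged pass over non-greens
lemma green_merge (green : Int → Prop) [DecidablePred green] (m : Int → Prop)
    [DecidablePred m] (k : Int → Char) (is : List Int) (code : List Char)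
    (d : PySem.Dict Char Int) (hnd : is.Nodup) (hnn : ∀ j ∈ is, 0 ≤ j) :
    is.foldl
      (fun (s : List Char × PySem.Dict Char Int) i =>
        if green i then (PySem.List.pySetD s.1 i '1', s.2)
        else if m i ∧ s.2.getD (k i) 0 ≥ 1 then
          (PySem.List.pySetD s.1 i '2', s.2.modify (k i) 0 (· - 1))
        else (PySem.List.pySetD s.1 i '3', s.2)) (code, d)
    = (is.filter (fun i => decide (¬ green i))).foldl
        (fun (s : List Char × PySem.Dict Char Int) i =>
          if green i then (PySem.List.pySetD s.1 i '1', s.2)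
          else if m i ∧ s.2.getD (k i) 0 ≥ 1 then
            (PySem.List.pySetD s.1 i '2', s.2.modify (k i) 0 (· - 1))
          else (PySem.List.pySetD s.1 i '3', s.2))
        (is.foldl (fun c i => if green i then PySem.List.pySetD c i '1' else c) code, d) := by
  induction is generalizing code d with
  | nil => rfl
  | cons j js ih =>
    have hj : 0 ≤ j := hnn j (by simp)
    have hjs : ∀ x ∈ js, 0 ≤ x := fun x hx => hnn x (by simp [hx])
    have hjn : j ∉ js := (List.nodup_cons.mp hnd).1
    have hndt : js.Nodup := (List.nodup_cons.mp hnd).2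
    by_cases hg : green j
    · rw [List.filter_cons_of_neg (by simpa using hg)]
      simp only [List.foldl_cons]
      rw [if_pos hg, if_pos hg]
      exact ih _ _ hndt hjs
    · rw [List.filter_cons_of_pos (by simpa using hg)]
      simp only [List.foldl_cons]
      rw [if_neg hg, if_neg hg, if_neg hg]
      by_cases hc : m j ∧ d.getD (k j) 0 ≥ 1
      · rw [if_pos hc, if_pos hc]
        rw [ih _ _ hndt hjs]
        rw [setD_fold_comm green (fun _ => '1') js code j '2' hj hjs hjn]
      · rw [if_neg hc, if_neg hc]
        rw [ih _ _ hndt hjs]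
        rw [setD_fold_comm green (fun _ => '1') js code j '3' hj hjs hjn]

-- the merged positional pass over [a..5) writes buildCode into the buffer
lemma write_eq_buildCode (green : Int → Prop) [DecidablePred green] (m : Int → Prop)
    [DecidablePred m] (k : Int → Char) :
    ∀ (n a : Nat), a + n = 5 → ∀ (code : List Char), code.length = 5 →
    ∀ (d : PySem.Dict Char Int),
    ((PySem.List.pyRange a 5 1).foldl
      (fun (s : List Char × PySem.Dict Char Int) i =>
        if green i then (PySem.List.pySetD s.1 i '1', s.2)
        else if m i ∧ s.2.getD (k i) 0 ≥ 1 then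
          (PySem.List.pySetD s.1 i '2', s.2.modify (k i) 0 (· - 1))
        else (PySem.List.pySetD s.1 i '3', s.2)) (code, d)).1
    = code.take a ++ buildCode green m k (PySem.List.pyRange a 5 1) d := by
  intro n
  induction n with
  | zero =>
    intro a ha code hlen d
    have h5 : (a : Int) = 5 := by omega
    rw [h5, PySem.List.pyRange_one_eq_nil (le_refl 5)]
    simp [buildCode, List.take_of_length_le, hlen, show (5:Nat) ≤ a from by omega]
  | succ n ih =>
    intro a ha code hlen d
    have hlt : (a : Int) < 5 := by omega
    rw [PySem.List.pyRange_one_cons hlt]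
    have hsucc : ((a : Int) + 1) = ((a + 1 : Nat) : Int) := by push_cast; ring
    have haN : a < code.length := by omega
    have hset : ∀ c : Char, PySem.List.pySetD code (a : Int) c = code.set a c := by
      intro c
      rw [PySem.List.pySetD_of_nonneg _ _ (by positivity)]
      norm_num
    simp only [List.foldl_cons]
    by_cases hg : green (a : Int)
    · rw [if_pos hg]
      show (List.foldl _ (PySem.List.pySetD code (a:Int) '1', d) _).1 = _
      rw [hset, hsucc, ih (a+1) (by omega) _ (by simp [hlen]) d]
      rw [buildCode, if_pos hg, take_succ_set _ _ _ haN]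
      simp
    · rw [if_neg hg]
      by_cases hc : m (a : Int) ∧ d.getD (k (a : Int)) 0 ≥ 1
      · rw [if_pos hc]
        show (List.foldl _ (PySem.List.pySetD code (a:Int) '2', d.modify (k (a:Int)) 0 (· - 1)) _).1 = _
        rw [hset, hsucc, ih (a+1) (by omega) _ (by simp [hlen]) _]
        rw [buildCode, if_neg hg, if_pos hc, take_succ_set _ _ _ haN]
        simp
      · rw [if_neg hc]
        show (List.foldl _ (PySem.List.pySetD code (a:Int) '3', d) _).1 = _
        rw [hset, hsucc, ih (a+1) (by omega) _ (by simp [hlen]) d]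
        rw [buildCode, if_neg hg, if_neg hc, take_succ_set _ _ _ haN]
        simp

-- ===== VERDICT (by name: the statement is the Claim_ definition above) =====
theorem get_color_comb_spec : Claim_equal_get_color_comb := by
  intro guess ans _dom _pre
  show get_color_comb guess ans = get_color_comb_alt guess ans
  unfold get_color_comb get_color_comb_alt
  simp only []
  set gl := guess.toList with hgl
  set al := ans.toList with hal
  rw [st1_split]
  simp only []
  have hgreens : List.foldl (fun g i => if PySem.List.pyGetD gl i ' ' = PySem.List.pyGetD al i ' ' then g ++ [i] else g) [] (PySem.List.pyRange 0 5 1)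
      = (PySem.List.pyRange 0 5 1).filter (fun i => decide (PySem.List.pyGetD gl i ' ' = PySem.List.pyGetD al i ' ')) := by
    simpa using PySem.List.foldl_append_ite_eq_filter
      (fun i => PySem.List.pyGetD gl i ' ' = PySem.List.pyGetD al i ' ') (PySem.List.pyRange 0 5 1) []
  rw [hgreens]
  have hrem : (PySem.List.pyRange 0 5 1).filter
        (fun i => decide (i ∉ (PySem.List.pyRange 0 5 1).filter (fun i => decide (PySem.List.pyGetD gl i ' ' = PySem.List.pyGetD al i ' '))))
      = (PySem.List.pyRange 0 5 1).filter (fun i => decide (PySem.List.pyGetD gl i ' ' ≠ PySem.List.pyGetD al i ' ')) := by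
    refine List.filter_congr ?_
    intro x hx
    simp [List.mem_filter, hx]
  rw [hrem]
  set L := (PySem.List.pyRange 0 5 1).filter (fun i => decide (PySem.List.pyGetD gl i ' ' ≠ PySem.List.pyGetD al i ' ')) with hL
  set lets := L.map (fun x => PySem.List.pyGetD al x ' ') with hlets
  rw [st2_split]
  simp only []
  have hgreys : List.foldl (fun g ri => if PySem.List.pyGetD gl ri ' ' ∉ lets then g ++ [ri] else g) [] L
      = L.filter (fun i => decide (PySem.List.pyGetD gl i ' ' ∉ lets)) := by
    simpa using PySem.List.foldl_append_ite_eq_filter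
      (fun ri => PySem.List.pyGetD gl ri ' ' ∉ lets) L []
  rw [hgreys]
  have hyell : (PySem.List.pyRange 0 5 1).filter
        (fun i => decide (i ∉ L.filter (fun i => decide (PySem.List.pyGetD gl i ' ' ∉ lets)) ∧ i ∈ L))
      = L.filter (fun i => decide (PySem.List.pyGetD gl i ' ' ∈ lets)) := by
    conv_rhs => rw [hL, List.filter_filter]
    refine List.filter_congr ?_
    intro x hx
    by_cases h1 : PySem.List.pyGetD gl x ' ' = PySem.List.pyGetD al x ' ' <;>
      by_cases h2 : PySem.List.pyGetD gl x ' ' ∈ lets <;>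
      simp [hL, List.mem_filter, h1, h2, hx]
  rw [hyell]
  have hnd : L.Nodup := (PySem.List.nodup_pyRange_one 0 5).filter _
  have hnn : ∀ j ∈ L, (0:Int) ≤ j := by
    intro j hj
    have := List.mem_of_mem_filter hj
    rw [PySem.List.mem_pyRange_one] at this
    omega
  have hng : ∀ j ∈ L, ¬ (PySem.List.pyGetD gl j ' ' = PySem.List.pyGetD al j ' ') := by
    intro j hj
    have := (List.mem_filter.mp hj).2
    simpa using this
  rw [grey_yellow_merge (fun i => PySem.List.pyGetD gl i ' ' = PySem.List.pyGetD al i ' ')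
    (fun i => PySem.List.pyGetD gl i ' ' ∈ lets) (fun i => PySem.List.pyGetD gl i ' ')
    L _ _ hnd hnn hng]
  have hnd0 : (PySem.List.pyRange 0 5 1).Nodup := PySem.List.nodup_pyRange_one 0 5
  have hnn0 : ∀ j ∈ PySem.List.pyRange 0 5 1, (0:Int) ≤ j := by
    intro j hj
    rw [PySem.List.mem_pyRange_one] at hj
    omega
  rw [← green_merge (fun i => PySem.List.pyGetD gl i ' ' = PySem.List.pyGetD al i ' ')
    (fun i => PySem.List.pyGetD gl i ' ' ∈ lets) (fun i => PySem.List.pyGetD gl i ' ')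
    (PySem.List.pyRange 0 5 1) ['_', '_', '_', '_', '_'] _ hnd0 hnn0]
  have hw := write_eq_buildCode (fun i => PySem.List.pyGetD gl i ' ' = PySem.List.pyGetD al i ' ')
    (fun i => PySem.List.pyGetD gl i ' ' ∈ lets) (fun i => PySem.List.pyGetD gl i ' ')
    5 0 (by omega) ['_', '_', '_', '_', '_'] rfl
  norm_num at hw
  rw [hw]
  simp only [PySem.Set.mem_ofList]
  rw [foldB_eq_buildCode (fun i => PySem.List.pyGetD gl i ' ' = PySem.List.pyGetD al i ' ')
    (fun i => PySem.List.pyGetD gl i ' ' ∈ lets) (fun i => PySem.List.pyGetD gl i ' ')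
    (PySem.List.pyRange 0 5 1) []]
  rw [List.nil_append]
  refine congrArg _ (buildCode_congr _ _ _ _ _ _ ?_)
  intro c
  refine green_dict_congr gl al _ _ _ ?_ c
  intro c'
  rw [getD_setfold_count, getD_counterfold_count]
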